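-- pv_equiv track=rewrite | github.com/netology-code/python-final-diplom | web_shop/validators/email.py | check_prohibited
-- ===== SOURCE A (Python) =====
-- def check_prohibited(email) -> bool:
--     """No prohibited symbols in email."""
--     prohibited_symbols = [
--         " ",
--         ",",
--         ":",
--         ";",
--         "!",
--         "#",
--         "%",
--         "*",
--         "(",
--         ")",
--         "=",
--         "+",
--         "{",
--         "}",
--         "[",
--         "]",
--         '"',
--         "'",
--         "/",
--         "\\",
--         "|",
--     ]
--     return all(i not in email for i in prohibited_symbols)
-- ===== SOURCE B (Python) =====
-- PROHIBITED = frozenset(' ,:;!#%*()=+{}[]"\'/\\|')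
--
-- def check_prohibited(email) -> bool:
--     """No prohibited symbols in email."""
--     for c in email:
--         if c in PROHIBITED:
--             return False
--     return True
-- ===== Notes on version B (the rewrite author's own statement) =====
-- stated objective: idiomatic
-- what changed: Instead of looping over the 21 prohibited symbols and substring-scanning the whole email for each, B makes one pass over the email's characters with an early return on the first hit in a constant frozenset.
import Mathlib
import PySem

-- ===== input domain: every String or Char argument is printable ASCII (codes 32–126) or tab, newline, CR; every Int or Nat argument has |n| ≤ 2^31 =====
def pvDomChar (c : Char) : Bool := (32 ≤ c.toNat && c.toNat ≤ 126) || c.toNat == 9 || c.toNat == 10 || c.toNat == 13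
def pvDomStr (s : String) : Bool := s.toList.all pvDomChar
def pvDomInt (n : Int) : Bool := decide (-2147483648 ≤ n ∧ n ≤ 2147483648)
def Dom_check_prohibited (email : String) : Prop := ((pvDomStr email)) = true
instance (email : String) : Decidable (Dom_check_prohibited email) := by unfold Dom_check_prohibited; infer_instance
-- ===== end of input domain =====

-- ===== PORT A =====
-- A: loop over the fixed list of prohibited symbol STRINGS, substring test each against email
def check_prohibited (email : String) : Bool :=
  let prohibited_symbols : List String :=
    [" ", ",", ":", ";", "!", "#", "%", "*", "(", ")", "=", "+",
     "{", "}", "[", "]", "\"", "'", "/", "\\", "|"]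
  prohibited_symbols.all (fun i => !(PySem.Str.isIn i email))

-- ===== PORT B =====
def pvProhibitedSet : PySem.Set Char :=
  PySem.Set.ofList [' ', ',', ':', ';', '!', '#', '%', '*', '(', ')', '=', '+',
                    '{', '}', '[', ']', '"', '\'', '/', '\\', '|']

-- B: one pass over email's characters, early False on first prohibited character
def pvScan : List Char → Bool
  | [] => true
  | c :: rest => if PySem.Set.contains pvProhibitedSet c then false else pvScan rest

def check_prohibited_alt (email : String) : Bool :=
  pvScan email.toList

-- ===== PRECONDITION & SPEC =====
def Spec_check_prohibited (email : String) (out : Bool) : Prop := out = check_prohibited_alt email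
instance (email : String) (out : Bool) : Decidable (Spec_check_prohibited email out) := by unfold Spec_check_prohibited; infer_instance

-- ===== CLAIM (what is proved, stated in full; the proofs are below) =====
def Claim_equal_check_prohibited : Prop := ∀ (email : String), Dom_check_prohibited email → Spec_check_prohibited email (check_prohibited email)

-- ===== LEMMAS AND PROOFS =====

-- ===== VERDICT (by name: the statement is the Claim_ definition above) =====
lemma pvScan_eq_all (l : List Char) :
    pvScan l = l.all (fun c => !(PySem.Set.contains pvProhibitedSet c)) := by
  induction l with
  | nil => rfl
  | cons c rest ih =>
      rw [List.all_cons, ← ih]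
      simp only [pvScan]
      cases h : PySem.Set.contains pvProhibitedSet c <;> simp [h]

-- the 21 prohibited characters, as a plain char list
def pvProhibChars : List Char :=
  [' ', ',', ':', ';', '!', '#', '%', '*', '(', ')', '=', '+',
   '{', '}', '[', ']', '"', '\'', '/', '\\', '|']

-- a one-character substring test is a character-membership test
lemma isIn_singleton (c : Char) (s : String) :
    PySem.Str.isIn (String.ofList [c]) s = s.toList.contains c := by
  rw [Bool.eq_iff_iff, PySem.Str.isIn_iff_infix, List.contains_eq_mem, decide_eq_true_iff]
  have htl : (String.ofList [c]).toList = [c] := by first | exact String.toList_ofList [c] | simp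
  constructor
  · intro h; exact h.mem (by rw [htl]; exact List.mem_singleton_self c)
  · intro h
    obtain ⟨l1, l2, hl⟩ := List.append_of_mem h
    exact ⟨l1, l2, by rw [hl, htl]; simp⟩

-- disjointness of two char lists can be checked from either side
lemma all_not_contains_comm (P E : List Char) :
    P.all (fun c => !E.contains c) = E.all (fun c => !P.contains c) := by
  rw [Bool.eq_iff_iff]
  simp only [List.all_eq_true, Bool.not_eq_true', List.contains_eq_mem, decide_eq_false_iff_not]
  exact ⟨fun h c hc hp => h _ hp hc, fun h c hc hp => h _ hp hc⟩

theorem check_prohibited_spec : Claim_equal_check_prohibited := by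
  intro email _
  unfold Spec_check_prohibited check_prohibited check_prohibited_alt
  rw [pvScan_eq_all]
  have hmap : ([" ", ",", ":", ";", "!", "#", "%", "*", "(", ")", "=", "+",
      "{", "}", "[", "]", "\"", "'", "/", "\\", "|"] : List String)
      = pvProhibChars.map (fun c => String.ofList [c]) := by decide
  rw [hmap, List.all_map]
  simp only [Function.comp_def, isIn_singleton]
  rw [all_not_contains_comm]
  have hset : ∀ c : Char, PySem.Set.contains pvProhibitedSet c = pvProhibChars.contains c := by
    intro c
    simp [pvProhibitedSet, pvProhibChars, PySem.Set.ofList, PySem.Set.contains]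
  simp only [hset]
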